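-- pv_equiv track=rewrite | github.com/ispras/qdt | qemu/cpu.py | split_intervals
-- ===== SOURCE A (Python) =====
-- def split_intervals(intervals, read_size):
--     "Splits intervals by read_size."
--
--     new_intervals = []
--
--     for i in intervals:
--         cur_offset, length = i
--
--         if (cur_offset // read_size != (cur_offset + length - 1) // read_size):
--             while length > 0:
--                 new_offset = (cur_offset // read_size + 1) * read_size
--                 new_length = min(new_offset - cur_offset, length)
--
--                 new_intervals.append((cur_offset, new_length))
--
--                 length -= new_offset - cur_offset
--                 cur_offset = new_offset
--         else:
--             new_intervals.append(i)
--
--     return new_intervals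
-- ===== SOURCE B (Python) =====
-- def split_intervals(intervals, read_size):
--     "Splits intervals by read_size."
--     new_intervals = []
--     for off, length in intervals:
--         if off // read_size == (off + length - 1) // read_size:
--             new_intervals.append((off, length))
--         elif length > 0:
--             bounds = [off] + list(range((off // read_size + 1) * read_size,
--                                         off + length, read_size)) + [off + length]
--             new_intervals.extend((a, b - a) for a, b in zip(bounds, bounds[1:]))
--     return new_intervals
-- ===== Notes on version B (the rewrite author's own statement) =====
-- stated objective: alternative
-- what changed: A advances an offset in a while loop emitting one chunk per iteration; B precomputes all cut points at once with range() and pairs consecutive bounds with zip, emitting (a, b-a) per pair.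
-- outside the precondition, e.g. on split_intervals([(1, 2)], -4): A returns [(1, 2)], B returns [(1, 2)]; on split_intervals([(0, 1)], 0): A raises ZeroDivisionError, B raises ZeroDivisionError; on split_intervals([(0, 2)], -4): A does not finish within the time limit, B returns [(0, 2)]
import Mathlib
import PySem

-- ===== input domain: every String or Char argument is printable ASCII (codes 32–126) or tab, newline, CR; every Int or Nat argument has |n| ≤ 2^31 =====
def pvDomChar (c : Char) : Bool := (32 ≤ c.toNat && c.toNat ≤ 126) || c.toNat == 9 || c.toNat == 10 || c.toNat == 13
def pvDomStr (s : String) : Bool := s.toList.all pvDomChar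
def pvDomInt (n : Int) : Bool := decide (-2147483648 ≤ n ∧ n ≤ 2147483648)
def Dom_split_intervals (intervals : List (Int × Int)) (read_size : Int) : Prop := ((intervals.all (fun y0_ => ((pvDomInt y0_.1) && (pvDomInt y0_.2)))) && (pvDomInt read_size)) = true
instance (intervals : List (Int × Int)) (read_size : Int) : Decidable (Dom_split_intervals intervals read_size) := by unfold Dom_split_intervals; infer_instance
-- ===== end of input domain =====

-- B replaces A's offset-advancing while loop by precomputing all cut points with range() and
-- pairing consecutive bounds with zip (objective: alternative decomposition, same cost).


-- ===== PORT A =====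
-- A's inner 'while length > 0' loop; fuel = length.toNat suffices because with
-- read_size > 0 each iteration decreases length by at least 1 (see pvAWhile fuel invariant).
def pvAWhile (read_size : Int) : Nat → Int → Int → List (Int × Int) → List (Int × Int)
  | 0, _, _, acc => acc
  | fuel+1, cur_offset, length, acc =>
    if 0 < length then
      let new_offset := (PySem.Int.floordiv cur_offset read_size + 1) * read_size
      let new_length := min (new_offset - cur_offset) length
      pvAWhile read_size fuel new_offset (length - (new_offset - cur_offset))
        (acc ++ [(cur_offset, new_length)])
    else acc

def split_intervals (intervals : List (Int × Int)) (read_size : Int) : List (Int × Int) :=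
  intervals.foldl (fun new_intervals i =>
    if PySem.Int.floordiv i.1 read_size ≠ PySem.Int.floordiv (i.1 + i.2 - 1) read_size then
      pvAWhile read_size i.2.toNat i.1 i.2 new_intervals
    else new_intervals ++ [i]) []

-- ===== PORT B =====
-- bounds = [off] + list(range((off // read_size + 1) * read_size, off + length, read_size)) + [off + length]
def pvBounds (off length read_size : Int) : List Int :=
  off :: (PySem.List.pyRange ((PySem.Int.floordiv off read_size + 1) * read_size) (off + length) read_size
          ++ [off + length])

def split_intervals_alt (intervals : List (Int × Int)) (read_size : Int) : List (Int × Int) :=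
  intervals.foldl (fun new_intervals i =>
    if PySem.Int.floordiv i.1 read_size = PySem.Int.floordiv (i.1 + i.2 - 1) read_size then
      new_intervals ++ [(i.1, i.2)]
    else if 0 < i.2 then
      let bounds := pvBounds i.1 i.2 read_size
      new_intervals ++ (bounds.zip bounds.tail).map (fun p => (p.1, p.2 - p.1))
    else new_intervals) []

-- ===== PRECONDITION & SPEC =====
-- Pre_ excludes non-positive read_size: read_size == 0 makes A raise ZeroDivisionError, and
-- read_size < 0 makes A's while loop diverge on any interval crossing a block boundary
-- (on the remaining read_size < 0 inputs A and B return the same value; see the cites).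
def Pre_split_intervals (intervals : List (Int × Int)) (read_size : Int) : Prop := 0 < read_size
instance (intervals : List (Int × Int)) (read_size : Int) : Decidable (Pre_split_intervals intervals read_size) := by unfold Pre_split_intervals; infer_instance
def pvWitness_split_intervals : (List (Int × Int)) × Int := ([(0, 5), (3, 0), (7, 2)], 4)

def Spec_split_intervals (intervals : List (Int × Int)) (read_size : Int) (out : List (Int × Int)) : Prop := out = split_intervals_alt intervals read_size
instance (intervals : List (Int × Int)) (read_size : Int) (out : List (Int × Int)) : Decidable (Spec_split_intervals intervals read_size out) := by unfold Spec_split_intervals; infer_instance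

-- ===== CLAIM (what is proved, stated in full; the proofs are below) =====
def Claim_equal_split_intervals : Prop := ∀ (intervals : List (Int × Int)) (read_size : Int), Dom_split_intervals intervals read_size → Pre_split_intervals intervals read_size → Spec_split_intervals intervals read_size (split_intervals intervals read_size)

-- ===== LEMMAS AND PROOFS =====

theorem pyRange_pos_nil {a b s : Int} (hs : 0 < s) (hba : b ≤ a) :
    PySem.List.pyRange a b s = [] := by
  rw [PySem.List.pyRange_of_pos _ _ hs]
  simp [Int.not_lt.mpr hba]

theorem pyRange_pos_cons {a b s : Int} (hs : 0 < s) (hab : a < b) :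
    PySem.List.pyRange a b s = a :: PySem.List.pyRange (a + s) b s := by
  rw [PySem.List.pyRange_of_pos _ _ hs, PySem.List.pyRange_of_pos _ _ hs]
  have hs' : s ≠ 0 := by omega
  have hc : (0:Int) ≤ b - a - 1 := by omega
  have hsplit : b - a + s - 1 = (b - a - 1) + 1 * s := by ring
  have hdiv : (b - a + s - 1) / s = (b - a - 1) / s + 1 := by
    rw [hsplit, Int.add_mul_ediv_right _ _ hs']
  have hdnn : (0:Int) ≤ (b - a - 1) / s := Int.ediv_nonneg hc (le_of_lt hs)
  have hm : (if a + s < b then ((b - (a + s) + s - 1) / s).toNat else 0)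
      = ((b - a - 1) / s).toNat := by
    split
    · congr 1; ring_nf
    · have hlt : b - a - 1 < s := by omega
      have : (b - a - 1) / s = 0 := Int.ediv_eq_zero_of_lt hc hlt
      simp [this]
  have hn : ((b - a + s - 1) / s).toNat = ((b - a - 1) / s).toNat + 1 := by
    rw [hdiv]; omega
  simp only [if_pos hab, hm, hn, List.range_succ_eq_map]
  simp only [List.map_cons, List.map_map]
  congr 1
  · simp
  · apply List.map_congr_left
    intro k _
    simp only [Function.comp]
    push_cast
    ring

theorem pvAWhile_nonpos (rs : Int) (fuel : Nat) (off len : Int) (acc : List (Int × Int))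
    (h : len ≤ 0) : pvAWhile rs fuel off len acc = acc := by
  cases fuel with
  | zero => rfl
  | succ f => simp [pvAWhile, Int.not_lt.mpr h]

-- the key loop characterisation: for a positive length, A's while loop emits exactly
-- the consecutive-bound pairs B builds, regardless of whether the interval crosses a boundary
theorem pvAWhile_eq_pairs (rs : Int) (hrs : 0 < rs) :
    ∀ (fuel : Nat) (off len : Int), 0 < len → len ≤ (fuel : Int) →
    ∀ (acc : List (Int × Int)),
    pvAWhile rs fuel off len acc
      = acc ++ ((pvBounds off len rs).zip (pvBounds off len rs).tail).map
          (fun p => (p.1, p.2 - p.1)) := by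
  intro fuel
  induction fuel with
  | zero => intro off len hl hf acc; exfalso; omega
  | succ f ih =>
    intro off len hl hf acc
    have hq := (PySem.Int.floordiv_eq_iff_of_pos (a := off) (b := rs)
      (q := PySem.Int.floordiv off rs) hrs).mp rfl
    set q := PySem.Int.floordiv off rs with hqdef
    set no := (q + 1) * rs with hno
    have hlt : off < no := by rw [hno]; exact hq.2
    have hle : no - off ≤ rs := by
      have := hq.1
      rw [hno]; nlinarith [hq.1]
    rw [pvAWhile]
    simp only [if_pos hl, ← hqdef, ← hno]
    by_cases hcross : off + len ≤ no
    · -- last chunk: the whole remaining interval fits before the next boundary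
      have hmin : min (no - off) len = len := by omega
      have hrest : len - (no - off) ≤ 0 := by omega
      rw [hmin, pvAWhile_nonpos _ _ _ _ _ hrest]
      have hrange : PySem.List.pyRange no (off + len) rs = [] := pyRange_pos_nil hrs hcross
      simp [pvBounds, ← hno, ← hqdef, hrange, List.zip]
    · -- the chunk up to the next boundary, then the loop continues at no
      rw [Int.not_le] at hcross
      have hmin : min (no - off) len = no - off := by omega
      have hlen' : 0 < len - (no - off) := by omega
      have hf' : len - (no - off) ≤ (f : Int) := by
        push_cast at hf ⊢; omega
      rw [hmin, ih no (len - (no - off)) hlen' hf']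
      have hqno : PySem.Int.floordiv no rs = q + 1 := by
        rw [PySem.Int.floordiv_eq_iff_of_pos hrs]
        constructor
        · rw [hno]
        · rw [hno]; nlinarith
      have hend : no + (len - (no - off)) = off + len := by ring
      have hrange : PySem.List.pyRange no (off + len) rs
          = no :: PySem.List.pyRange (no + rs) (off + len) rs := pyRange_pos_cons hrs hcross
      have hnext2 : (q + 1 + 1) * rs = no + rs := by rw [hno]; ring
      simp only [pvBounds, ← hqdef, ← hno, hqno, hend, hrange, hnext2]
      simp [List.zip]

-- per-interval step equality
theorem step_eq (rs : Int) (hrs : 0 < rs) (acc : List (Int × Int)) (i : Int × Int) :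
    (if PySem.Int.floordiv i.1 rs ≠ PySem.Int.floordiv (i.1 + i.2 - 1) rs then
       pvAWhile rs i.2.toNat i.1 i.2 acc
     else acc ++ [i])
    = (if PySem.Int.floordiv i.1 rs = PySem.Int.floordiv (i.1 + i.2 - 1) rs then
         acc ++ [(i.1, i.2)]
       else if 0 < i.2 then
         acc ++ (((pvBounds i.1 i.2 rs).zip (pvBounds i.1 i.2 rs).tail).map
           (fun p => (p.1, p.2 - p.1)))
       else acc) := by
  by_cases h : PySem.Int.floordiv i.1 rs = PySem.Int.floordiv (i.1 + i.2 - 1) rs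
  · simp [h]
  · simp only [h, if_false, ne_eq, not_false_iff, if_true]
    by_cases hl : 0 < i.2
    · rw [pvAWhile_eq_pairs rs hrs i.2.toNat i.1 i.2 hl (by omega) acc]
      simp [hl]
    · rw [pvAWhile_nonpos _ _ _ _ _ (by omega)]
      simp [hl]

theorem foldl_eq (rs : Int) (hrs : 0 < rs) :
    ∀ (l : List (Int × Int)) (acc : List (Int × Int)),
    l.foldl (fun new_intervals i =>
      if PySem.Int.floordiv i.1 rs ≠ PySem.Int.floordiv (i.1 + i.2 - 1) rs then
        pvAWhile rs i.2.toNat i.1 i.2 new_intervals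
      else new_intervals ++ [i]) acc
    = l.foldl (fun new_intervals i =>
      if PySem.Int.floordiv i.1 rs = PySem.Int.floordiv (i.1 + i.2 - 1) rs then
        new_intervals ++ [(i.1, i.2)]
      else if 0 < i.2 then
        let bounds := pvBounds i.1 i.2 rs
        new_intervals ++ (bounds.zip bounds.tail).map (fun p => (p.1, p.2 - p.1))
      else new_intervals) acc := by
  intro l
  induction l with
  | nil => intro acc; rfl
  | cons x xs ih =>
    intro acc
    simp only [List.foldl_cons]
    rw [step_eq rs hrs acc x, ih]

-- ===== VERDICT (by name: the statement is the Claim_ definition above) =====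
theorem split_intervals_spec : Claim_equal_split_intervals := by
  intro intervals read_size _ hpre
  unfold Spec_split_intervals split_intervals split_intervals_alt
  exact foldl_eq read_size hpre intervals []
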